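-- pv_equiv track=rewrite | github.com/kaczla/phd-model-evaluations | phd_model_evaluations/dataset/lm_gap/dataset_lm_gap_utils.py | get_set_names_form_directory_names
-- ===== SOURCE A (Python) =====
-- from typing import Dict, List, Tuple
--
-- def get_set_names_form_directory_names(directory_names: List[str]) -> Tuple[List[str], List[str], List[str]]:
--     train_set_names, valid_set_names, test_set_names = [], [], []
--
--     for directory_name in directory_names:
--         if directory_name.startswith("train"):
--             train_set_names.append(directory_name)
--         elif directory_name.startswith("dev-"):
--             valid_set_names.append(directory_name)
--         elif directory_name.startswith("test-"):
--             test_set_names.append(directory_name)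
--
--     train_set_names.sort()
--     valid_set_names.sort()
--     test_set_names.sort()
--
--     return train_set_names, valid_set_names, test_set_names
-- ===== SOURCE B (Python) =====
-- def get_set_names_form_directory_names(directory_names):
--     sorted_names = sorted(directory_names)
--     return (
--         [n for n in sorted_names if n.startswith("train")],
--         [n for n in sorted_names if n.startswith("dev-")],
--         [n for n in sorted_names if n.startswith("test-")],
--     )
-- ===== Notes on version B (the rewrite author's own statement) =====
-- stated objective: simpler
-- what changed: Replaces the partition loop followed by three per-bucket sorts with one global sort followed by three prefix-filter comprehensions.
import Mathlib
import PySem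

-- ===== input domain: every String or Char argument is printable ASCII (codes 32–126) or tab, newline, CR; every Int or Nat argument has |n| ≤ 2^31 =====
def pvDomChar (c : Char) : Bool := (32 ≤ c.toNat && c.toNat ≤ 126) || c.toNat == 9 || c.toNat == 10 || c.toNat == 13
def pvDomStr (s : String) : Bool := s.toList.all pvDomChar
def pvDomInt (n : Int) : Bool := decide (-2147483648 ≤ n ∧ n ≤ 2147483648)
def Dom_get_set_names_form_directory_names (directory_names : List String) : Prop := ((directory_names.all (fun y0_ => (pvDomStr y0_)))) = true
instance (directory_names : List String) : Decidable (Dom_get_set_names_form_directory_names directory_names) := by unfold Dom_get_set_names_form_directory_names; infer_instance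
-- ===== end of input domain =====

-- B replaces A's 'partition loop, then sort each bucket' by 'sort once, then three prefix filters' (simpler decomposition; return value equal).

-- ===== PORT A =====
-- one step of A's for-loop: append the name to the bucket chosen by the if/elif chain
def pvStepA (acc : List String × List String × List String) (directory_name : String) :
    List String × List String × List String :=
  if PySem.Str.startswith directory_name "train" then (acc.1 ++ [directory_name], acc.2.1, acc.2.2)
  else if PySem.Str.startswith directory_name "dev-" then (acc.1, acc.2.1 ++ [directory_name], acc.2.2)
  else if PySem.Str.startswith directory_name "test-" then (acc.1, acc.2.1, acc.2.2 ++ [directory_name])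
  else acc

def get_set_names_form_directory_names (directory_names : List String) : List String × List String × List String :=
  let buckets := directory_names.foldl pvStepA ([], [], [])
  (PySem.List.sorted buckets.1 (fun x => x) false,
   PySem.List.sorted buckets.2.1 (fun x => x) false,
   PySem.List.sorted buckets.2.2 (fun x => x) false)

-- ===== PORT B =====
def get_set_names_form_directory_names_alt (directory_names : List String) : List String × List String × List String :=
  let sorted_names := PySem.List.sorted directory_names (fun x => x) false
  (sorted_names.filter (fun n => PySem.Str.startswith n "train"),
   sorted_names.filter (fun n => PySem.Str.startswith n "dev-"),
   sorted_names.filter (fun n => PySem.Str.startswith n "test-"))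

-- ===== PRECONDITION & SPEC =====
def Spec_get_set_names_form_directory_names (directory_names : List String) (out : List String × List String × List String) : Prop := out = get_set_names_form_directory_names_alt directory_names
instance (directory_names : List String) (out : List String × List String × List String) : Decidable (Spec_get_set_names_form_directory_names directory_names out) := by unfold Spec_get_set_names_form_directory_names; infer_instance

-- ===== CLAIM (what is proved, stated in full; the proofs are below) =====
def Claim_equal_get_set_names_form_directory_names : Prop := ∀ (directory_names : List String), Dom_get_set_names_form_directory_names directory_names → Spec_get_set_names_form_directory_names directory_names (get_set_names_form_directory_names directory_names)

-- ===== LEMMAS AND PROOFS =====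

-- two prefixes of the same list that disagree within their first two characters exclude each other
theorem pv_take2_of_prefix (l p : List Char) (h2 : 2 ≤ p.length) (hp : p <+: l) :
    l.take 2 = p.take 2 := by
  obtain ⟨t, rfl⟩ := hp
  rw [List.take_append_of_le_length h2]

theorem pv_prefix_excl (l p q : List Char) (h2p : 2 ≤ p.length) (h2q : 2 ≤ q.length)
    (hne : p.take 2 ≠ q.take 2)
    (hp : PySem.Chars.startswith l p = true) : PySem.Chars.startswith l q = false := by
  by_contra h
  rw [Bool.not_eq_false, PySem.Chars.startswith_iff] at h
  rw [PySem.Chars.startswith_iff] at hp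
  exact hne ((pv_take2_of_prefix l p h2p hp).symm.trans (pv_take2_of_prefix l q h2q h))

-- A's fold computes the three plain prefix filters
theorem pv_fold_filter (xs : List String) (a b c : List String) :
    xs.foldl pvStepA (a, b, c) =
      (a ++ xs.filter (fun n => PySem.Str.startswith n "train"),
       b ++ xs.filter (fun n => PySem.Str.startswith n "dev-"),
       c ++ xs.filter (fun n => PySem.Str.startswith n "test-")) := by
  induction xs generalizing a b c with
  | nil => simp
  | cons x xs ih =>
    simp only [List.foldl_cons, List.filter_cons]
    by_cases h1 : PySem.Chars.startswith x.toList ['t', 'r', 'a', 'i', 'n'] = true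
    · have h2 : PySem.Chars.startswith x.toList ['d', 'e', 'v', '-'] = false :=
        pv_prefix_excl _ _ _ (by decide) (by decide) (by decide) h1
      have h3 : PySem.Chars.startswith x.toList ['t', 'e', 's', 't', '-'] = false :=
        pv_prefix_excl _ _ _ (by decide) (by decide) (by decide) h1
      have hstep : pvStepA (a, b, c) x = (a ++ [x], b, c) := by simp [pvStepA, h1]
      rw [hstep, ih]
      simp [PySem.Str.startswith_eq, h1, h2, h3]
    · by_cases h2 : PySem.Chars.startswith x.toList ['d', 'e', 'v', '-'] = true
      · have h1' : PySem.Chars.startswith x.toList ['t', 'r', 'a', 'i', 'n'] = false :=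
          pv_prefix_excl _ _ _ (by decide) (by decide) (by decide) h2
        have h3 : PySem.Chars.startswith x.toList ['t', 'e', 's', 't', '-'] = false :=
          pv_prefix_excl _ _ _ (by decide) (by decide) (by decide) h2
        have hstep : pvStepA (a, b, c) x = (a, b ++ [x], c) := by simp [pvStepA, h1', h2]
        rw [hstep, ih]
        simp [PySem.Str.startswith_eq, h1', h2, h3]
      · by_cases h3 : PySem.Chars.startswith x.toList ['t', 'e', 's', 't', '-'] = true
        · have h1' : PySem.Chars.startswith x.toList ['t', 'r', 'a', 'i', 'n'] = false :=
            pv_prefix_excl _ _ _ (by decide) (by decide) (by decide) h3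
          have h2' : PySem.Chars.startswith x.toList ['d', 'e', 'v', '-'] = false :=
            pv_prefix_excl _ _ _ (by decide) (by decide) (by decide) h3
          have hstep : pvStepA (a, b, c) x = (a, b, c ++ [x]) := by simp [pvStepA, h1', h2', h3]
          rw [hstep, ih]
          simp [PySem.Str.startswith_eq, h1', h2', h3]
        · simp at h1 h2 h3
          have hstep : pvStepA (a, b, c) x = (a, b, c) := by simp [pvStepA, h1, h2, h3]
          rw [hstep, ih]
          simp [PySem.Str.startswith_eq, h1, h2, h3]

-- sorting a filter = filtering the sorted list
theorem pv_sorted_filter (xs : List String) (p : String → Bool) :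
    PySem.List.sorted (xs.filter p) (fun x => x) false =
      (PySem.List.sorted xs (fun x => x) false).filter p := by
  apply PySem.List.sorted_id_eq_of_perm_of_pairwise
  · exact ((PySem.List.sorted_perm xs (fun x => x) false).filter p)
  · exact List.Pairwise.filter p (PySem.List.sorted_pairwise xs (fun x => x))

-- ===== VERDICT (by name: the statement is the Claim_ definition above) =====
theorem get_set_names_form_directory_names_spec : Claim_equal_get_set_names_form_directory_names := by
  intro xs _
  unfold Spec_get_set_names_form_directory_names
  unfold get_set_names_form_directory_names get_set_names_form_directory_names_alt
  simp only [pv_fold_filter xs [] [] [], List.nil_append, pv_sorted_filter]
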